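-- pv_equiv track=rewrite | github.com/nordeim/Medical-AI-Assistant | serving/api/endpoints/clinical_decision_support.py | _identify_red_flags
-- ===== SOURCE A (Python) =====
-- from typing import Dict, Any, List, Optional, Union, Literal
--
-- def _identify_red_flags(symptoms: List[str]) -> List[str]:
--     """Identify emergency red flag symptoms"""
--
--     red_flags = []
--     emergency_symptoms = [
--         "chest pain", "difficulty breathing", "severe headache",
--         "loss of consciousness", "severe bleeding", "signs of stroke"
--     ]
--
--     for symptom in symptoms:
--         for emergency in emergency_symptoms:
--             if emergency in symptom.lower():
--                 red_flags.append(symptom)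
--                 break
--
--     return red_flags
-- ===== SOURCE B (Python) =====
-- _PHRASES = ["chest pain", "difficulty breathing", "severe headache",
--             "loss of consciousness", "severe bleeding", "signs of stroke"]
--
-- def _contains_phrase(text):
--     """One left-to-right pass over text, simulating all partial phrase
--     matches in parallel (NFA-style): `states` holds the suffixes of
--     phrases whose prefix ends exactly here; no per-phrase re-scanning."""
--     states = []
--     for c in text:
--         states = [p[1:] for p in _PHRASES + states if p.startswith(c)]
--         if "" in states:
--             return True
--     return False
--
-- def _identify_red_flags(symptoms):
--     """Identify emergency red flag symptoms"""
--     return [s for s in symptoms if _contains_phrase(s.lower())]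
-- ===== Notes on version B (the rewrite author's own statement) =====
-- stated objective: alternative
-- what changed: Replaced A's per-phrase substring loop (with break) by an NFA-style multi-pattern scan: one left-to-right pass over each lowered symptom maintaining the list of phrase suffixes whose prefix matched so far, advancing all partial matches in parallel and succeeding when one empties.
import Mathlib
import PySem

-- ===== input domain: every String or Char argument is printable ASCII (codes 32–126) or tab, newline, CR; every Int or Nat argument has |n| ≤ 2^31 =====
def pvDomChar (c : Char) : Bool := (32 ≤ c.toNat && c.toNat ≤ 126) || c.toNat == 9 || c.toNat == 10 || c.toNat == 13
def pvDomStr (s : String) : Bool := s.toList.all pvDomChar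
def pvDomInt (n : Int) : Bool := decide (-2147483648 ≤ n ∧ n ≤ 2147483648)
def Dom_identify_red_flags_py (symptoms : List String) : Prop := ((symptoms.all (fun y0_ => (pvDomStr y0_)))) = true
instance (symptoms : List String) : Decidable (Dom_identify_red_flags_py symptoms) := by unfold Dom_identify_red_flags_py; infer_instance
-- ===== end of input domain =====

-- B replaces A's per-phrase inner substring loop (with break) by an NFA-style single left-to-right
-- pass over the lowered symptom that advances all partial phrase matches in parallel; objective:
-- alternative multi-pattern matching algorithm of similar cost.


-- ===== PORT A =====
-- the literal 'emergency_symptoms' list of A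
def pvEmergencyA : List String :=
  ["chest pain", "difficulty breathing", "severe headache",
   "loss of consciousness", "severe bleeding", "signs of stroke"]

-- inner 'for emergency in emergency_symptoms: if emergency in symptom.lower(): append; break'
def pvInnerA (symptom low : String) (red_flags : List String) : List String → List String
  | [] => red_flags
  | e :: rest =>
    if PySem.Str.isIn e low then red_flags ++ [symptom] else pvInnerA symptom low red_flags rest

def identify_red_flags_py (symptoms : List String) : List String :=
  symptoms.foldl (fun red_flags symptom => pvInnerA symptom (PySem.Str.lower symptom) red_flags pvEmergencyA) []

-- ===== PORT B =====
-- _PHRASES of Source B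
def pvPhrasesB : List (List Char) :=
  ["chest pain".toList, "difficulty breathing".toList, "severe headache".toList,
   "loss of consciousness".toList, "severe bleeding".toList, "signs of stroke".toList]

-- '[p[1:] for p in _PHRASES + states if p.startswith(c)]' (startswith with a single char:
-- false on the empty string, else compare the first character)
def pvAdvance (c : Char) (ps : List (List Char)) : List (List Char) :=
  ps.filterMap fun p =>
    match p with
    | [] => none
    | d :: t => if d = c then some t else none

-- the 'for c in text' loop of _contains_phrase, over the remaining text and the current states
def pvContains (states : List (List Char)) : List Char → Bool
  | [] => false
  | c :: rest =>
    let next := pvAdvance c (pvPhrasesB ++ states)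
    if ([] : List Char) ∈ next then true else pvContains next rest

def identify_red_flags_py_alt (symptoms : List String) : List String :=
  symptoms.filter (fun s => pvContains [] (PySem.Chars.lower s.toList))

-- ===== PRECONDITION & SPEC =====
def Spec_identify_red_flags_py (symptoms : List String) (out : List String) : Prop := out = identify_red_flags_py_alt symptoms
instance (symptoms : List String) (out : List String) : Decidable (Spec_identify_red_flags_py symptoms out) := by unfold Spec_identify_red_flags_py; infer_instance

-- ===== CLAIM (what is proved, stated in full; the proofs are below) =====
def Claim_equal_identify_red_flags_py : Prop := ∀ (symptoms : List String), Dom_identify_red_flags_py symptoms → Spec_identify_red_flags_py symptoms (identify_red_flags_py symptoms)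

-- ===== LEMMAS AND PROOFS =====

-- A's inner loop appends the symptom exactly once iff some phrase is a substring of the lowered symptom
theorem pvInnerA_eq (symptom low : String) (red_flags : List String) (es : List String) :
    pvInnerA symptom low red_flags es =
      (if es.any (fun e => PySem.Str.isIn e low) then red_flags ++ [symptom] else red_flags) := by
  induction es with
  | nil => simp [pvInnerA]
  | cons e rest ih =>
    simp only [pvInnerA, ih, List.any_cons, Bool.or_eq_true]
    split_ifs <;> tauto

theorem mem_pvAdvance (c : Char) (ps : List (List Char)) (t : List Char) :
    t ∈ pvAdvance c ps ↔ (c :: t) ∈ ps := by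
  simp only [pvAdvance, List.mem_filterMap]
  constructor
  · rintro ⟨p, hp, hf⟩
    match p with
    | [] => simp at hf
    | d :: t' =>
      by_cases h : d = c <;> simp [h] at hf
      subst hf; subst h; exact hp
  · intro h; exact ⟨c :: t, h, by simp⟩

-- correctness of the parallel scan, given that no pending state is already complete
theorem pvContains_iff (rest : List Char) : ∀ (states : List (List Char)),
    ([] : List Char) ∉ states →
    (pvContains states rest = true ↔
      (∃ t ∈ states, t <+: rest) ∨ ∃ p ∈ pvPhrasesB, p ≠ [] ∧ p <:+: rest) := by
  induction rest with
  | nil =>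
    intro states hni
    simp only [pvContains, Bool.false_eq_true, false_iff]
    rintro (⟨t, ht, hpre⟩ | ⟨p, hp, hne, hinf⟩)
    · exact hni (List.prefix_nil.mp hpre ▸ ht)
    · exact hne (List.infix_nil.mp hinf)
  | cons c r ih =>
    intro states hni
    simp only [pvContains]
    by_cases hdone : ([] : List Char) ∈ pvAdvance c (pvPhrasesB ++ states)
    · simp only [hdone, if_true, true_iff]
      rcases List.mem_append.mp ((mem_pvAdvance c _ []).mp hdone) with h | h
      · exact Or.inr ⟨[c], h, by simp, List.infix_cons_iff.mpr (Or.inl (by simp))⟩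
      · exact Or.inl ⟨[c], h, by simp⟩
    · simp only [hdone, if_false]
      rw [ih _ hdone]
      constructor
      · rintro (⟨t, ht, hpre⟩ | ⟨p, hp, hne, hinf⟩)
        · rcases List.mem_append.mp ((mem_pvAdvance c _ t).mp ht) with h | h
          · exact Or.inr ⟨c :: t, h, by simp, List.infix_cons_iff.mpr
              (Or.inl (List.cons_prefix_cons.mpr ⟨rfl, hpre⟩))⟩
          · exact Or.inl ⟨c :: t, h, List.cons_prefix_cons.mpr ⟨rfl, hpre⟩⟩
        · exact Or.inr ⟨p, hp, hne, List.infix_cons_iff.mpr (Or.inr hinf)⟩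
      · rintro (⟨t, ht, hpre⟩ | ⟨p, hp, hne, hinf⟩)
        · -- a pending state t (nonempty) is a prefix of c :: r
          match t, ne_of_mem_of_not_mem ht hni with
          | d :: t', _ =>
            obtain ⟨hd, ht'⟩ := List.cons_prefix_cons.mp hpre
            exact Or.inl ⟨t', (mem_pvAdvance c _ t').mpr (List.mem_append.mpr (Or.inr (hd ▸ ht))), ht'⟩
        · rcases List.infix_cons_iff.mp hinf with hpre | hinf'
          · match p, hne with
            | d :: p', _ =>
              obtain ⟨hd, hp'⟩ := List.cons_prefix_cons.mp hpre
              exact Or.inl ⟨p', (mem_pvAdvance c _ p').mpr (List.mem_append.mpr (Or.inl (hd ▸ hp))), hp'⟩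
          · exact Or.inr ⟨p, hp, hne, hinf'⟩

-- the per-symptom tests of the two programs agree
theorem test_eq (s : String) :
    pvEmergencyA.any (fun e => PySem.Str.isIn e (PySem.Str.lower s)) =
      pvContains [] (PySem.Chars.lower s.toList) := by
  rw [Bool.eq_iff_iff]
  rw [pvContains_iff _ _ (by simp)]
  simp only [List.not_mem_nil, false_and, exists_false, false_or,
    List.any_eq_true]
  constructor
  · rintro ⟨e, he, hin⟩
    refine ⟨e.toList, ?_, ?_, ?_⟩
    · fin_cases he <;> simp [pvPhrasesB]
    · fin_cases he <;> decide
    · have := (PySem.Str.isIn_iff_infix _ _).mp hin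
      simpa [PySem.Str.toList_lower] using this
  · rintro ⟨p, hp, hne, hinf⟩
    have hmap : pvPhrasesB = pvEmergencyA.map String.toList := by rfl
    rw [hmap, List.mem_map] at hp
    obtain ⟨e, he, rfl⟩ := hp
    refine ⟨e, he, ?_⟩
    rw [PySem.Str.isIn_iff_infix]
    simpa [PySem.Str.toList_lower] using hinf

-- ===== VERDICT (by name: the statement is the Claim_ definition above) =====
theorem identify_red_flags_py_spec : Claim_equal_identify_red_flags_py := by
  intro symptoms _
  show identify_red_flags_py symptoms = identify_red_flags_py_alt symptoms
  unfold identify_red_flags_py identify_red_flags_py_alt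
  rw [show (fun red_flags symptom =>
        pvInnerA symptom (PySem.Str.lower symptom) red_flags pvEmergencyA) =
      (fun (red_flags : List String) symptom =>
        if pvEmergencyA.any (fun e => PySem.Str.isIn e (PySem.Str.lower symptom))
        then red_flags ++ [symptom] else red_flags) from
    funext fun acc => funext fun s => pvInnerA_eq s _ acc _]
  rw [PySem.List.foldl_append_if_eq_filter]
  simp only [List.nil_append]
  exact List.filter_congr (fun s _ => test_eq s)
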